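-- pv_equiv track=rewrite | github.com/rahimegedik/Mini-Python-Project | python/split_stack.py | split_stack
-- ===== SOURCE A (Python) =====
-- def split_stack(a):
--     b=[]
--     c=[]
--     for item in range(len(a)):
--         if a[item]>=0:
--             b.append(a[item])
--         else:
--             c.append(a[item])
--         a[item]=0
--     b.reverse()
--     c.reverse()
--     c.extend(b)
--     for k in range(len(c)):
--         a[k]=c[k]
--     return a
-- ===== SOURCE B (Python) =====
-- def split_stack(a):
--     n = len(a)
--     k = sum(1 for x in a if not (x >= 0))  # negatives end up in out[0:k]
--     out = [0] * n
--     i, j = 0, k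
--     for x in reversed(a):
--         if x >= 0:
--             out[j] = x
--             j += 1
--         else:
--             out[i] = x
--             i += 1
--     a[:] = out
--     return a
-- ===== Notes on version B (the rewrite author's own statement) =====
-- stated objective: alternative
-- what changed: Replaces A's partition-into-two-lists + two reversals + copy-back loop by a count of the negatives followed by one backward pass that places each element directly at its final index via two write pointers into a preallocated output (no partition lists, no reversals).
import Mathlib
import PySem

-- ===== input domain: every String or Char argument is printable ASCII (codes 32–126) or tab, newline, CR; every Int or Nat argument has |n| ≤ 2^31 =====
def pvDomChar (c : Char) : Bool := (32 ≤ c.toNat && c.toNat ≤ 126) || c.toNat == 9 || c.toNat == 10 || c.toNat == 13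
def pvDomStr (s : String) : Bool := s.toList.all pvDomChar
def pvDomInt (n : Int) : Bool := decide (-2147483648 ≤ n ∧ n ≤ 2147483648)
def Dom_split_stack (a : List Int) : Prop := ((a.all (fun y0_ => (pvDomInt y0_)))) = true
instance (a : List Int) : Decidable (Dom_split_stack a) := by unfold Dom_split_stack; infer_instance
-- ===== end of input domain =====

-- B replaces A's partition lists + reversals + copy-back by counting the negatives and one
-- backward pass writing each element at its final index (alternative algorithm, same cost).
-- Both Pythons mutate `a` in place to the same final content; the theorems are about the
-- returned value.

-- ===== PORT A =====
-- state: (a, b, c); a[item] is read, appended to b or c, then a[item] := 0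
def split_stack (a : List Int) : List Int :=
  let s := (List.range a.length).foldl
    (fun (st : List Int × List Int × List Int) item =>
      let arr := st.1
      let b := st.2.1
      let c := st.2.2
      let x := arr.getD item 0
      if x ≥ 0 then (arr.set item 0, b ++ [x], c)
      else (arr.set item 0, b, c ++ [x]))
    (a, [], [])
  let arr := s.1
  let b := s.2.1.reverse
  let c := s.2.2.reverse
  let c := c ++ b
  (List.range c.length).foldl (fun arr k => arr.set k (c.getD k 0)) arr

-- ===== PORT B =====
-- k = number of negatives; out preallocated; one backward pass with write pointers i (negatives,
-- from 0) and j (non-negatives, from k)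
def altStep (st : List Int × Nat × Nat) (x : Int) : List Int × Nat × Nat :=
  match st with
  | (out, i, j) => if x ≥ 0 then (out.set j x, i, j + 1) else (out.set i x, i + 1, j)

def split_stack_alt (a : List Int) : List Int :=
  let n := a.length
  let k := a.countP (fun x => !decide (x ≥ 0))
  let out := List.replicate n (0 : Int)
  let s := a.reverse.foldl altStep (out, 0, k)
  s.1

-- ===== PRECONDITION & SPEC =====
def Spec_split_stack (a : List Int) (out : List Int) : Prop := out = split_stack_alt a
instance (a : List Int) (out : List Int) : Decidable (Spec_split_stack a out) := by unfold Spec_split_stack; infer_instance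

-- ===== CLAIM (what is proved, stated in full; the proofs are below) =====
def Claim_equal_split_stack : Prop := ∀ (a : List Int), Dom_split_stack a → Spec_split_stack a (split_stack a)

-- ===== LEMMAS AND PROOFS =====

-- invariant of A's first loop after i steps
theorem split_loop_inv (a : List Int) (i : Nat) (hi : i ≤ a.length) :
    (List.range i).foldl
      (fun (st : List Int × List Int × List Int) item =>
        let arr := st.1
        let b := st.2.1
        let c := st.2.2
        let x := arr.getD item 0
        if x ≥ 0 then (arr.set item 0, b ++ [x], c)
        else (arr.set item 0, b, c ++ [x]))
      (a, [], [])
    = (List.replicate i (0 : Int) ++ a.drop i,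
       (a.take i).filter (fun x => decide (x ≥ 0)),
       (a.take i).filter (fun x => !decide (x ≥ 0))) := by
  induction i with
  | zero => simp
  | succ n ih =>
    have hn : n ≤ a.length := Nat.le_of_succ_le hi
    have hlt : n < a.length := hi
    rw [List.range_succ, List.foldl_append, ih hn]
    have hdrop : a.drop n = a[n] :: a.drop (n + 1) := List.drop_eq_getElem_cons hlt
    have hget : (List.replicate n (0 : Int) ++ a.drop n)[n]?.getD 0 = a[n] := by
      rw [List.getElem?_append_right (by simp), hdrop]
      simp [List.getElem?_eq_getElem hlt]
    have hset : (List.replicate n (0 : Int) ++ a.drop n).set n 0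
        = List.replicate (n + 1) (0 : Int) ++ a.drop (n + 1) := by
      rw [List.set_append_right _ _ (by simp), hdrop]
      simp only [List.length_replicate, Nat.sub_self, List.set_cons_zero, List.replicate_succ',
        List.append_assoc, List.singleton_append]
    have htake : a.take (n + 1) = a.take n ++ [a[n]] := List.take_succ_eq_append_getElem hlt
    simp only [List.foldl_cons, List.foldl_nil]
    rw [htake, List.filter_append, List.filter_append]
    by_cases h : a[n] ≥ 0 <;> simp [hget, h, hset]

-- A's write-back loop: arr of the same length is overwritten by c
theorem write_back (c : List Int) : ∀ (i : Nat), i ≤ c.length → ∀ (arr : List Int),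
    arr.length = c.length →
    (List.range i).foldl (fun arr k => arr.set k (c.getD k 0)) arr
      = c.take i ++ arr.drop i := by
  intro i
  induction i with
  | zero => intro _ arr _; simp
  | succ n ih =>
    intro hi arr hlen
    have hn : n ≤ c.length := Nat.le_of_succ_le hi
    have hlt : n < c.length := hi
    have hlta : n < arr.length := by omega
    rw [List.range_succ, List.foldl_append, ih hn arr hlen]
    simp only [List.foldl_cons, List.foldl_nil]
    have hdrop : arr.drop n = arr[n] :: arr.drop (n + 1) := List.drop_eq_getElem_cons hlta
    rw [List.set_append_right _ _ (by simp [Nat.min_eq_left hn]),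
      List.take_succ_eq_append_getElem hlt, hdrop]
    simp only [List.length_take, Nat.min_eq_left hn, Nat.sub_self, List.getD,
      List.getElem?_eq_getElem hlt, Option.getD_some, List.set_cons_zero, List.append_assoc,
      List.singleton_append]

-- A's value in closed form
theorem split_stack_eq (a : List Int) :
    split_stack a = (a.filter (fun x => !decide (x ≥ 0))).reverse
      ++ (a.filter (fun x => decide (x ≥ 0))).reverse := by
  unfold split_stack
  simp only [split_loop_inv a a.length (le_refl _), List.drop_length, List.take_length,
    List.append_nil]
  have hlen : (List.replicate a.length (0 : Int)).length
      = ((a.filter (fun x => !decide (x ≥ 0))).reverse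
         ++ (a.filter (fun x => decide (x ≥ 0))).reverse).length := by
    simp [List.length_append, Nat.add_comm,
      ← List.length_eq_length_filter_add (l := a) (fun x => decide (x ≥ 0))]
  rw [write_back ((a.filter (fun x => !decide (x ≥ 0))).reverse
      ++ (a.filter (fun x => decide (x ≥ 0))).reverse) _ (le_refl _) _ hlen]
  rw [List.take_of_length_le (le_refl _), List.drop_eq_nil_of_le (Nat.le_of_eq hlen),
    List.append_nil]

-- invariant of B's placement loop: out consists of a filled negative zone A0, p spare zeros,
-- a filled non-negative zone B0, q spare zeros; l's negatives extend A0 and its non-negatives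
-- extend B0
theorem alt_loop_inv : ∀ (l A0 B0 : List Int) (p q : Nat),
    l.countP (fun x => !decide (x ≥ 0)) ≤ p →
    l.countP (fun x => decide (x ≥ 0)) ≤ q →
    l.foldl altStep
      (A0 ++ List.replicate p 0 ++ B0 ++ List.replicate q 0,
       A0.length, A0.length + p + B0.length)
    = (A0 ++ l.filter (fun x => !decide (x ≥ 0))
         ++ List.replicate (p - l.countP (fun x => !decide (x ≥ 0))) 0
         ++ (B0 ++ l.filter (fun x => decide (x ≥ 0)))
         ++ List.replicate (q - l.countP (fun x => decide (x ≥ 0))) 0,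
       A0.length + l.countP (fun x => !decide (x ≥ 0)),
       A0.length + p + B0.length + l.countP (fun x => decide (x ≥ 0))) := by
  intro l
  induction l with
  | nil => intro A0 B0 p q _ _; simp
  | cons x l ih =>
    intro A0 B0 p q hp hq
    by_cases h : x ≥ 0
    · -- non-negative: write at index A0.length + p + B0.length (first spare of the q-zone)
      have hcn : (x :: l).countP (fun y => !decide (y ≥ 0))
          = l.countP (fun y => !decide (y ≥ 0)) := by simp [List.countP_cons, h]
      have hcp : (x :: l).countP (fun y => decide (y ≥ 0))
          = l.countP (fun y => decide (y ≥ 0)) + 1 := by simp [List.countP_cons, h]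
      have hfn : (x :: l).filter (fun y => !decide (y ≥ 0))
          = l.filter (fun y => !decide (y ≥ 0)) := by simp [List.filter_cons, h]
      have hfp : (x :: l).filter (fun y => decide (y ≥ 0))
          = x :: l.filter (fun y => decide (y ≥ 0)) := by simp [List.filter_cons, h]
      rw [hcn] at hp; rw [hcp] at hq
      obtain ⟨q', rfl⟩ : ∃ q', q = q' + 1 := ⟨q - 1, by omega⟩
      have hset : (A0 ++ List.replicate p (0:Int) ++ B0 ++ List.replicate (q'+1) 0).set
          (A0.length + p + B0.length) x
          = A0 ++ List.replicate p 0 ++ (B0 ++ [x]) ++ List.replicate q' 0 := by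
        rw [List.set_append_right _ _ (by simp; omega),
          show A0.length + p + B0.length
              - (A0 ++ List.replicate p (0:Int) ++ B0).length = 0 by simp; omega]
        simp [List.replicate_succ, List.append_assoc]
      have hstep : altStep
          (A0 ++ List.replicate p 0 ++ B0 ++ List.replicate (q'+1) 0,
           A0.length, A0.length + p + B0.length) x
          = (A0 ++ List.replicate p 0 ++ (B0 ++ [x]) ++ List.replicate q' 0,
             A0.length, A0.length + p + (B0 ++ [x]).length) := by
        simp only [altStep, if_pos h, hset, Prod.mk.injEq, eq_self_iff_true, true_and,
          List.length_append, List.length_cons, List.length_nil]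
        all_goals omega
      rw [List.foldl_cons, hstep, ih A0 (B0 ++ [x]) p q' hp (by omega)]
      rw [hcn, hcp, hfn, hfp,
        show q' + 1 - (l.countP (fun y => decide (y ≥ 0)) + 1)
            = q' - l.countP (fun y => decide (y ≥ 0)) by omega]
      rw [Prod.mk.injEq, Prod.mk.injEq]
      refine ⟨by simp [List.append_assoc], ?_, ?_⟩ <;>
        first
          | omega
          | (simp only [List.length_append, List.length_cons, List.length_nil]; omega)
    · -- negative: write at index A0.length (first spare of the p-zone)
      have hcn : (x :: l).countP (fun y => !decide (y ≥ 0))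
          = l.countP (fun y => !decide (y ≥ 0)) + 1 := by simp [List.countP_cons, h]
      have hcp : (x :: l).countP (fun y => decide (y ≥ 0))
          = l.countP (fun y => decide (y ≥ 0)) := by simp [List.countP_cons, h]
      have hfn : (x :: l).filter (fun y => !decide (y ≥ 0))
          = x :: l.filter (fun y => !decide (y ≥ 0)) := by simp [List.filter_cons, h]
      have hfp : (x :: l).filter (fun y => decide (y ≥ 0))
          = l.filter (fun y => decide (y ≥ 0)) := by simp [List.filter_cons, h]
      rw [hcn] at hp; rw [hcp] at hq
      obtain ⟨p', rfl⟩ : ∃ p', p = p' + 1 := ⟨p - 1, by omega⟩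
      have hset : (A0 ++ List.replicate (p'+1) (0:Int) ++ B0 ++ List.replicate q 0).set
          A0.length x
          = (A0 ++ [x]) ++ List.replicate p' 0 ++ B0 ++ List.replicate q 0 := by
        rw [List.set_append_left _ _ (by simp),
          List.set_append_left _ _ (by simp),
          List.set_append_right _ _ (le_refl _), Nat.sub_self]
        simp [List.replicate_succ, List.append_assoc]
      have hstep : altStep
          (A0 ++ List.replicate (p'+1) 0 ++ B0 ++ List.replicate q 0,
           A0.length, A0.length + (p'+1) + B0.length) x
          = ((A0 ++ [x]) ++ List.replicate p' 0 ++ B0 ++ List.replicate q 0,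
             (A0 ++ [x]).length, (A0 ++ [x]).length + p' + B0.length) := by
        simp only [altStep, if_neg h, hset, Prod.mk.injEq, eq_self_iff_true, true_and,
          List.length_append, List.length_cons, List.length_nil]
        all_goals omega
      rw [List.foldl_cons, hstep, ih (A0 ++ [x]) B0 p' q (by omega) hq]
      rw [hcn, hcp, hfn, hfp,
        show p' + 1 - (l.countP (fun y => !decide (y ≥ 0)) + 1)
            = p' - l.countP (fun y => !decide (y ≥ 0)) by omega]
      rw [Prod.mk.injEq, Prod.mk.injEq]
      refine ⟨by simp [List.append_assoc], ?_, ?_⟩ <;>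
        first
          | omega
          | (simp only [List.length_append, List.length_cons, List.length_nil]; omega)

-- B's value in the same closed form
theorem split_stack_alt_eq (a : List Int) :
    split_stack_alt a = (a.filter (fun x => !decide (x ≥ 0))).reverse
      ++ (a.filter (fun x => decide (x ≥ 0))).reverse := by
  have hk : a.countP (fun x => !decide (x ≥ 0))
      + a.countP (fun x => decide (x ≥ 0)) = a.length := by
    have := List.length_eq_length_filter_add (l := a) (fun x => decide (x ≥ 0))
    simp only [List.countP_eq_length_filter]
    omega
  have hrep : List.replicate a.length (0 : Int)
      = [] ++ List.replicate (a.countP (fun x => !decide (x ≥ 0))) 0 ++ []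
        ++ List.replicate (a.countP (fun x => decide (x ≥ 0))) 0 := by
    simp [← List.replicate_add, hk]
  have harr := alt_loop_inv a.reverse [] []
    (a.countP (fun x => !decide (x ≥ 0))) (a.countP (fun x => decide (x ≥ 0)))
    (by rw [List.countP_reverse]) (by rw [List.countP_reverse])
  simp only [List.length_nil, Nat.zero_add, Nat.add_zero, List.nil_append,
    List.countP_reverse, List.filter_reverse] at harr
  simp only [split_stack_alt, hrep]
  simp only [List.length_nil, Nat.zero_add, List.nil_append] at hrep ⊢
  rw [harr]
  simp [List.countP_reverse, List.countP_eq_length_filter]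

-- ===== VERDICT (by name: the statement is the Claim_ definition above) =====
theorem split_stack_spec : Claim_equal_split_stack := by
  intro a _
  show split_stack a = split_stack_alt a
  rw [split_stack_eq, split_stack_alt_eq]
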